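-- pv_equiv track=rewrite | github.com/namishkgupta/NamishGuptaPrograms | American Computer Science League Competition/ACSL 03.py | splitParagraph
-- ===== SOURCE A (Python) =====
-- def splitParagraph(paragraph):
--    sentences = paragraph.split('.')
--    cleanedSentences = {}
--    sentenceCount=1
--    for sentence in sentences:
--        if sentence.strip():
--            cleanedSentences[sentenceCount] = sentence.strip()
--            sentenceCount+=1
--
--    words={}
--    for index, sentence in cleanedSentences.items():
--        wordList = sentence.split()
--        words[index] = wordList
--
--    characters = {}
--    for index, wordList in words.items():
--        characterList = []
--        for word in wordList:
--            characterList.extend([list(word)])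
--        characters[index] = characterList
--
--    return cleanedSentences, words, characters
-- ===== SOURCE B (Python) =====
-- def splitParagraph(paragraph):
--     # Streaming one-pass: peel one sentence at a time with split('.', 1),
--     # filling all three dicts together, instead of A's split-all + three passes.
--     cleanedSentences, words, characters = {}, {}, {}
--     count = 1
--     rest = paragraph
--     while True:
--         parts = rest.split('.', 1)
--         ws = parts[0].split()
--         if ws:
--             cleanedSentences[count] = parts[0].strip()
--             words[count] = ws
--             characters[count] = [list(w) for w in ws]
--             count += 1
--         if len(parts) == 1:
--             break
--         rest = parts[1]
--     return cleanedSentences, words, characters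
-- ===== Notes on version B (the rewrite author's own statement) =====
-- stated objective: alternative
-- what changed: B replaces A's batch a full sentence split followed by three sequential dict-building passes with a streaming while-loop that peels one sentence at a time via str.split with maxsplit 1, tests non-blankness by word-list truthiness, and fills all three dicts together in that single traversal.
import Mathlib
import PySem

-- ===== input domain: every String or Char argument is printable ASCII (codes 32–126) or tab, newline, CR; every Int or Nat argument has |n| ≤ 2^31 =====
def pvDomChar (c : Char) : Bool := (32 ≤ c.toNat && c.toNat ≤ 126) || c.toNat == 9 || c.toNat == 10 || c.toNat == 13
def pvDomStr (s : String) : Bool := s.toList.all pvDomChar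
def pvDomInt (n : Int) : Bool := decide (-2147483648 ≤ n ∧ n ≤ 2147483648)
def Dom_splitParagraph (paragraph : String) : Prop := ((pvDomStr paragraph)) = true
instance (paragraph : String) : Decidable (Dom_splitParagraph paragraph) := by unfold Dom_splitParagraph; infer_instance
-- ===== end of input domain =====

-- B replaces A's batch sentence split followed by three sequential dict-building passes with a
-- streaming loop that peels ONE sentence at a time (str.split with maxsplit 1) and fills all
-- three dicts together; alternative decomposition, same asymptotic cost.

-- shared primitive: list(word) — the word as a list of one-character strings
def pyCharList (w : String) : List String := w.toList.map (fun c => String.ofList [c])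

-- Python's paragraph.split('.') (separator ".", never empty, so split? always returns some)
def pySplitDot (s : String) : List String := (PySem.Str.split? s ".").getD []

-- ===== PORT A =====
def splitParagraph (paragraph : String) : (List (Int × String)) × (List (Int × List String)) × (List (Int × List (List String))) :=
  let sentences := pySplitDot paragraph
  let st := sentences.foldl
    (fun (acc : PySem.Dict Int String × Int) sentence =>
      if PySem.Str.strip sentence ≠ "" then
        (acc.1.insert acc.2 (PySem.Str.strip sentence), acc.2 + 1)
      else acc)
    (PySem.Dict.empty, 1)
  let cleanedSentences := st.1
  let words := cleanedSentences.items.foldl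
    (fun (w : PySem.Dict Int (List String)) p =>
      w.insert p.1 (PySem.Str.split₀ p.2))
    PySem.Dict.empty
  let characters := words.items.foldl
    (fun (c : PySem.Dict Int (List (List String))) p =>
      c.insert p.1 (p.2.foldl (fun cl word => cl ++ [pyCharList word]) []))
    PySem.Dict.empty
  (cleanedSentences.items, words.items, characters.items)

-- ===== PORT B =====
-- lemmas the port needs for termination (cited in decreasing_by)

-- splitOnMax with maxsplit exhausted returns the rest as the single last piece
lemma goMax_zero (fuel : Nat) (l cur : List Char) (acc : List (List Char)) :
    PySem.Chars.splitOnMax.go ['.'] fuel 0 l cur acc = ((cur.reverse ++ l) :: acc).reverse := by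
  cases fuel with
  | zero => rfl
  | succ f => cases l with
    | nil => simp [PySem.Chars.splitOnMax.go]
    | cons c rest => simp [PySem.Chars.splitOnMax.go]

-- s.split('.', 1) characterised: split at the first '.', if any
lemma goMax_one (l : List Char) : ∀ (fuel : Nat) (cur : List Char) (acc : List (List Char)),
    l.length < fuel →
    PySem.Chars.splitOnMax.go ['.'] fuel 1 l cur acc = acc.reverse ++
      (if '.' ∈ l then [cur.reverse ++ l.takeWhile (fun c => c != '.'),
                        (l.dropWhile (fun c => c != '.')).tail]
       else [cur.reverse ++ l]) := by
  induction l with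
  | nil =>
    intro fuel cur acc h
    cases fuel with
    | zero => omega
    | succ f => simp [PySem.Chars.splitOnMax.go]
  | cons c rest ih =>
    intro fuel cur acc h
    cases fuel with
    | zero => simp at h
    | succ f =>
      by_cases hc : c = '.'
      · subst hc
        simp [PySem.Chars.splitOnMax.go, goMax_zero, List.isPrefixOf]
      · have hne : ¬ ('.' : Char) = c := fun e => hc e.symm
        have hstep : PySem.Chars.splitOnMax.go ['.'] (f+1) 1 (c :: rest) cur acc
              = PySem.Chars.splitOnMax.go ['.'] f 1 rest (c :: cur) acc := by
          simp only [PySem.Chars.splitOnMax.go]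
          rw [if_neg (by omega), if_neg (by simp [List.isPrefixOf, hne])]
        rw [hstep, ih f (c :: cur) acc (by simp at h; omega)]
        simp [hc, hne]
lemma splitOnMax_dot (cs : List Char) :
    PySem.Chars.splitOnMax cs ['.'] 1 =
      (if '.' ∈ cs then [cs.takeWhile (fun c => c != '.'), (cs.dropWhile (fun c => c != '.')).tail]
       else [cs]) := by
  unfold PySem.Chars.splitOnMax
  rw [if_neg (by omega)]
  have := goMax_one cs (cs.length + 1) [] [] (by omega)
  simpa using this

lemma dotToList : (".".toList) = ['.'] := by decide

lemma parts_eq (rest : String) :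
    (PySem.Str.splitMax? rest "." 1).getD [] =
      (PySem.Chars.splitOnMax rest.toList ['.'] 1).map String.ofList := by
  rw [PySem.Str.splitMax?.eq_1, dotToList, PySem.Chars.splitMax?.eq_1]
  simp

lemma bgo_dec (rest : String)
    (h : ¬ ((PySem.Str.splitMax? rest "." 1).getD []).length = 1) :
    ((((PySem.Str.splitMax? rest "." 1).getD []).getD 1 "").toList).length < rest.toList.length := by
  rw [parts_eq] at h ⊢
  rw [splitOnMax_dot] at h ⊢
  by_cases hd : '.' ∈ rest.toList
  · rw [if_pos hd]
    have hne : rest.toList.dropWhile (fun c => c != '.') ≠ [] := by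
      intro hnil
      have h4 := List.dropWhile_eq_nil_iff.mp hnil
      have h5 := h4 '.' hd
      simp at h5
    have h1 : (rest.toList.dropWhile (fun c => c != '.')).length ≤ rest.toList.length :=
      List.length_dropWhile_le _ _
    have h2 : 0 < (rest.toList.dropWhile (fun c => c != '.')).length :=
      List.length_pos_iff.mpr hne
    have hlen : rest.toList.length = rest.length := by simp
    simp [List.getD]
    omega
  · simp [hd] at h

def splitParagraphBGo (rest : String) (cleaned : PySem.Dict Int String)
    (words : PySem.Dict Int (List String)) (characters : PySem.Dict Int (List (List String)))
    (count : Int) :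
    (List (Int × String)) × (List (Int × List String)) × (List (Int × List (List String))) :=
  let parts := (PySem.Str.splitMax? rest "." 1).getD []
  let head := parts.getD 0 ""
  let ws := PySem.Str.split₀ head
  let st :=
    if ws ≠ [] then
      (cleaned.insert count (PySem.Str.strip head), words.insert count ws,
       characters.insert count (ws.map pyCharList), count + 1)
    else (cleaned, words, characters, count)
  if _hone : parts.length = 1 then (st.1.items, st.2.1.items, st.2.2.1.items)
  else splitParagraphBGo (parts.getD 1 "") st.1 st.2.1 st.2.2.1 st.2.2.2
termination_by rest.toList.length
decreasing_by exact bgo_dec rest _hone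

def splitParagraph_alt (paragraph : String) : (List (Int × String)) × (List (Int × List String)) × (List (Int × List (List String))) :=
  splitParagraphBGo paragraph PySem.Dict.empty PySem.Dict.empty PySem.Dict.empty 1

-- ===== PRECONDITION & SPEC =====
def Spec_splitParagraph (paragraph : String) (out : (List (Int × String)) × (List (Int × List String)) × (List (Int × List (List String)))) : Prop := out = splitParagraph_alt paragraph
instance (paragraph : String) (out : (List (Int × String)) × (List (Int × List String)) × (List (Int × List (List String)))) : Decidable (Spec_splitParagraph paragraph out) := by unfold Spec_splitParagraph; infer_instance

-- ===== CLAIM (what is proved, stated in full; the proofs are below) =====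
def Claim_equal_splitParagraph : Prop := ∀ (paragraph : String), Dom_splitParagraph paragraph → Spec_splitParagraph paragraph (splitParagraph paragraph)

-- ===== LEMMAS AND PROOFS =====

-- the canonical value both ports are reduced to
def cleanedOf (s : String) : List String := ((pySplitDot s).map PySem.Str.strip).filter (· ≠ "")

def canonOf (s : String) (n : Int) :
    (List (Int × String)) × (List (Int × List String)) × (List (Int × List (List String))) :=
  (PySem.List.enumerate (cleanedOf s) n,
   PySem.List.enumerate ((cleanedOf s).map PySem.Str.split₀) n,
   PySem.List.enumerate (((cleanedOf s).map PySem.Str.split₀).map (fun ws => ws.map pyCharList)) n)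

------------------------------------------------------------------ A side

-- the counter loop over fresh increasing keys appends, yielding an enumeration
lemma loop1_items (xs : List String) (d : PySem.Dict Int String) (n : Int)
    (h : ∀ k ∈ d.keys, k < n) :
    ((xs.foldl
      (fun (acc : PySem.Dict Int String × Int) sentence =>
        if PySem.Str.strip sentence ≠ "" then
          (acc.1.insert acc.2 (PySem.Str.strip sentence), acc.2 + 1)
        else acc)
      (d, n)).1).items
    = d.items ++ PySem.List.enumerate ((xs.map PySem.Str.strip).filter (· ≠ "")) n := by
  induction xs generalizing d n with
  | nil => simp
  | cons x xs ih =>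
    simp only [List.foldl_cons, List.map_cons, List.filter_cons]
    by_cases hx : PySem.Str.strip x ≠ ""
    · have hc : d.contains n = false := by
        rw [PySem.Dict.contains_eq_decide_mem_keys]
        simp only [decide_eq_false_iff_not]
        intro hm; exact absurd (h n hm) (lt_irrefl n)
      rw [if_pos hx, ih _ _ (by
        intro k hk
        rcases (PySem.Dict.mem_keys_insert _ _ _ _).mp hk with hk | hk
        · omega
        · have := h k hk; omega)]
      rw [PySem.Dict.items_insert_of_not_contains _ _ hc]
      simp [hx, PySem.List.enumerate_cons]
    · rw [if_neg hx, ih _ _ h]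
      simp at hx
      simp [hx]

lemma enumerate_map {α β : Type} (f : α → β) (xs : List α) (s : Int) :
    PySem.List.enumerate (xs.map f) s
      = (PySem.List.enumerate xs s).map (fun p => (p.1, f p.2)) := by
  induction xs generalizing s with
  | nil => simp
  | cons x xs ih => simp [PySem.List.enumerate_cons, ih]

lemma nodup_fst_enumerate {α : Type} (xs : List α) (s : Int) :
    ((PySem.List.enumerate xs s).map (fun p : Int × α => p.1)).Nodup := by
  have := PySem.List.pairwise_lt_enumerate xs s
  exact List.Pairwise.imp (fun h => ne_of_lt h) (List.pairwise_map.mpr this)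

-- an insert loop keyed by the distinct first components of an enumeration appends into empty
lemma items_insert_loop {α ν : Type} (xs : List α) (s : Int) (v : Int × α → ν) :
    ((PySem.List.enumerate xs s).foldl
        (fun (d : PySem.Dict Int ν) p => d.insert p.1 (v p)) PySem.Dict.empty).items
      = (PySem.List.enumerate xs s).map (fun p => (p.1, v p)) := by
  rw [PySem.Dict.items_foldl_insert_fresh (k := fun p => p.1) (v := v)
      (d := PySem.Dict.empty) (l := PySem.List.enumerate xs s)
      (by intro a _; exact PySem.Dict.contains_empty _)
      (nodup_fst_enumerate xs s)]
  rfl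

lemma A_eq_canon (p : String) : splitParagraph p = canonOf p 1 := by
  unfold splitParagraph canonOf
  dsimp only
  rw [loop1_items _ _ _ (by simp)]
  simp only [show (PySem.Dict.empty : PySem.Dict Int String).items = [] from rfl, List.nil_append]
  rw [items_insert_loop _ 1 (fun p : Int × String => PySem.Str.split₀ p.2), ← enumerate_map,
      items_insert_loop _ 1
        (fun p : Int × List String => List.foldl (fun cl word => cl ++ [pyCharList word]) [] p.2)]
  simp only [PySem.List.foldl_append_singleton_eq_map, List.nil_append]
  rw [← enumerate_map (fun ws => List.map pyCharList ws)]
  rfl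

------------------------------------------------------------------ split('.') structure

lemma go_dot_acc (fuel : Nat) : ∀ (l cur : List Char) (acc : List (List Char)),
    PySem.Chars.splitOn.go ['.'] fuel l cur acc
      = acc.reverse ++ PySem.Chars.splitOn.go ['.'] fuel l cur [] := by
  induction fuel with
  | zero => intro l cur acc; simp [PySem.Chars.splitOn.go]
  | succ f ih =>
    intro l cur acc
    cases l with
    | nil => simp [PySem.Chars.splitOn.go]
    | cons c rest =>
      by_cases hc : c = '.'
      · subst hc
        simp only [PySem.Chars.splitOn.go, List.isPrefixOf, beq_self_eq_true, Bool.true_and]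
        rw [if_pos (by simp), if_pos (by simp)]
        rw [ih _ [] (cur.reverse :: acc), ih _ [] [cur.reverse]]
        simp
      · have hne : ¬ ('.' : Char) = c := fun e => hc e.symm
        simp only [PySem.Chars.splitOn.go]
        rw [if_neg (by simp [hne]), if_neg (by simp [hne])]
        exact ih rest (c :: cur) acc

lemma go_dot_struct (l : List Char) : ∀ (fuel : Nat) (cur : List Char),
    l.length < fuel →
    PySem.Chars.splitOn.go ['.'] fuel l cur []
      = (if '.' ∈ l
         then (cur.reverse ++ l.takeWhile (fun c => c != '.')) ::
              PySem.Chars.splitOn ((l.dropWhile (fun c => c != '.')).tail) ['.']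
         else [cur.reverse ++ l]) := by
  induction l with
  | nil =>
    intro fuel cur h
    cases fuel with
    | zero => omega
    | succ f => simp [PySem.Chars.splitOn.go]
  | cons c rest ih =>
    intro fuel cur h
    cases fuel with
    | zero => simp at h
    | succ f =>
      by_cases hc : c = '.'
      · subst hc
        simp only [PySem.Chars.splitOn.go]
        rw [if_pos (by simp [List.isPrefixOf])]
        rw [show List.drop (['.'].length) ('.' :: rest) = rest by simp]
        rw [go_dot_acc, ih f [] (by simp at h; omega)]
        rw [if_pos (show ('.' : Char) ∈ '.' :: rest by simp)]
        rw [show (List.dropWhile (fun c => c != '.') ('.' :: rest)).tail = rest by simp]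
        rw [show List.takeWhile (fun c => c != '.') ('.' :: rest) = ([] : List Char) by simp]
        rw [show PySem.Chars.splitOn rest ['.']
              = PySem.Chars.splitOn.go ['.'] (rest.length + 1) rest [] [] from rfl]
        rw [ih (rest.length + 1) [] (by omega)]
        simp
      · have hne : ¬ ('.' : Char) = c := fun e => hc e.symm
        have hstep : PySem.Chars.splitOn.go ['.'] (f+1) (c :: rest) cur []
              = PySem.Chars.splitOn.go ['.'] f rest (c :: cur) [] := by
          simp only [PySem.Chars.splitOn.go]
          rw [if_neg (by simp [List.isPrefixOf, hne])]
        rw [hstep, ih f (c :: cur) (by simp at h; omega)]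
        simp [hc, hne]

lemma splitOn_dot (cs : List Char) :
    PySem.Chars.splitOn cs ['.'] =
      (if '.' ∈ cs
       then cs.takeWhile (fun c => c != '.') ::
            PySem.Chars.splitOn ((cs.dropWhile (fun c => c != '.')).tail) ['.']
       else [cs]) := by
  have h := go_dot_struct cs (cs.length + 1) [] (by omega)
  simp only [List.reverse_nil, List.nil_append] at h
  calc PySem.Chars.splitOn cs ['.']
      = PySem.Chars.splitOn.go ['.'] (cs.length + 1) cs [] [] := rfl
    _ = _ := h

------------------------------------------------------------------ ws ≠ [] ↔ strip ≠ "" and split₀ ∘ strip = split₀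

lemma all_isspace_dropWhile (cs : List Char) :
    (cs.dropWhile PySem.Chars.isspace).all PySem.Chars.isspace = cs.all PySem.Chars.isspace := by
  induction cs with
  | nil => rfl
  | cons c rest ih =>
    by_cases hc : PySem.Chars.isspace c
    · simp [hc, ih]
    · simp [hc]

lemma strip_eq_nil_iff (cs : List Char) :
    PySem.Chars.strip cs = [] ↔ cs.all PySem.Chars.isspace := by
  unfold PySem.Chars.strip PySem.Chars.rstrip PySem.Chars.lstrip
  constructor
  · intro h
    have h2 : ((cs.dropWhile PySem.Chars.isspace).reverse.dropWhile PySem.Chars.isspace) = [] := by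
      simpa using h
    have h3 := List.dropWhile_eq_nil_iff.mp h2
    rw [← all_isspace_dropWhile cs]
    simp only [List.all_eq_true]
    intro x hx
    exact h3 x (List.mem_reverse.mpr hx)
  · intro h
    have : cs.dropWhile PySem.Chars.isspace = [] := by
      apply List.dropWhile_eq_nil_iff.mpr
      intro x hx
      exact List.all_eq_true.mp h x hx
    simp [this]

lemma split₀_go_eq_nil_iff (l : List Char) : ∀ (cur : List Char) (acc : List (List Char)),
    (PySem.Chars.split₀.go l cur acc = []) ↔ (acc = [] ∧ cur = [] ∧ l.all PySem.Chars.isspace) := by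
  induction l with
  | nil =>
    intro cur acc
    cases cur with
    | nil => simp [PySem.Chars.split₀.go]
    | cons c cs => simp [PySem.Chars.split₀.go]
  | cons c rest ih =>
    intro cur acc
    by_cases hc : PySem.Chars.isspace c
    · cases cur with
      | nil => simp [PySem.Chars.split₀.go, hc, ih]
      | cons d ds => simp [PySem.Chars.split₀.go, hc, ih]
    · simp [PySem.Chars.split₀.go, hc, ih]

lemma split₀_eq_nil_iff (cs : List Char) :
    PySem.Chars.split₀ cs = [] ↔ cs.all PySem.Chars.isspace := by
  unfold PySem.Chars.split₀
  simp [split₀_go_eq_nil_iff]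

-- split₀.go ignores an all-space tail / an all-space prefix (with empty current word)
lemma split₀_go_allspace (l : List Char) : ∀ (acc : List (List Char)),
    l.all PySem.Chars.isspace → PySem.Chars.split₀.go l [] acc = acc.reverse := by
  induction l with
  | nil => intro acc _; simp [PySem.Chars.split₀.go]
  | cons c rest ih =>
    intro acc h
    simp only [List.all_cons, Bool.and_eq_true] at h
    simp [PySem.Chars.split₀.go, h.1, ih _ h.2]

lemma split₀_go_trailing (t : List Char) : ∀ (l cur : List Char) (acc : List (List Char)),
    l.all PySem.Chars.isspace →
    PySem.Chars.split₀.go (t ++ l) cur acc = PySem.Chars.split₀.go t cur acc := by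
  induction t with
  | nil =>
    intro l cur acc h
    cases cur with
    | nil =>
      rw [List.nil_append]
      rw [split₀_go_allspace l acc h]
      rfl
    | cons d ds =>
      rw [List.nil_append]
      cases l with
      | nil => rfl
      | cons c cs =>
        simp only [List.all_cons, Bool.and_eq_true] at h
        simp [PySem.Chars.split₀.go, h.1, split₀_go_allspace cs _ h.2]
  | cons c t' ih =>
    intro l cur acc h
    by_cases hc : PySem.Chars.isspace c
    · cases cur with
      | nil => simp only [List.cons_append, PySem.Chars.split₀.go, hc]; simp [ih _ _ _ h]
      | cons d ds => simp only [List.cons_append, PySem.Chars.split₀.go]; simp [ih _ _ _ h]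
    · simp only [List.cons_append, PySem.Chars.split₀.go]; simp [ih _ _ _ h]

lemma split₀_go_leading (pre : List Char) : ∀ (l : List Char) (acc : List (List Char)),
    pre.all PySem.Chars.isspace →
    PySem.Chars.split₀.go (pre ++ l) [] acc = PySem.Chars.split₀.go l [] acc := by
  induction pre with
  | nil => intro l acc _; rfl
  | cons c pre' ih =>
    intro l acc h
    simp only [List.all_cons, Bool.and_eq_true] at h
    simp only [List.cons_append, PySem.Chars.split₀.go]
    simp [h.1, ih _ _ h.2]

lemma split₀_strip (cs : List Char) :
    PySem.Chars.split₀ (PySem.Chars.strip cs) = PySem.Chars.split₀ cs := by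
  unfold PySem.Chars.split₀
  have hdecomp : cs = cs.takeWhile PySem.Chars.isspace ++ PySem.Chars.lstrip cs := by
    unfold PySem.Chars.lstrip
    exact (List.takeWhile_append_dropWhile).symm
  have hpre : (cs.takeWhile PySem.Chars.isspace).all PySem.Chars.isspace := by
    simp only [List.all_eq_true]
    intro x hx
    exact List.mem_takeWhile_imp hx
  conv_rhs => rw [hdecomp]
  rw [split₀_go_leading _ _ _ hpre]
  -- now handle the trailing spaces: lstrip cs = strip cs ++ (all-space suffix)
  have hdecomp2 : PySem.Chars.lstrip cs
      = PySem.Chars.strip cs ++ ((PySem.Chars.lstrip cs).reverse.takeWhile PySem.Chars.isspace).reverse := by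
    unfold PySem.Chars.strip PySem.Chars.rstrip
    conv_lhs => rw [← List.reverse_reverse (PySem.Chars.lstrip cs)]
    rw [← List.reverse_append]
    rw [← List.takeWhile_append_dropWhile (p := PySem.Chars.isspace) (l := (PySem.Chars.lstrip cs).reverse)]
    simp
  have hsuf : (((PySem.Chars.lstrip cs).reverse.takeWhile PySem.Chars.isspace).reverse).all PySem.Chars.isspace := by
    simp only [List.all_eq_true]
    intro x hx
    exact List.mem_takeWhile_imp (List.mem_reverse.mp hx)
  conv_rhs => rw [hdecomp2]
  rw [split₀_go_trailing _ _ _ _ hsuf]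

------------------------------------------------------------------ Str-level bridges

lemma str_split₀_eq (s : String) :
    PySem.Str.split₀ s = (PySem.Chars.split₀ s.toList).map String.ofList := by
  rw [PySem.Str.split₀.eq_1]

lemma str_split₀_strip (s : String) :
    PySem.Str.split₀ (PySem.Str.strip s) = PySem.Str.split₀ s := by
  rw [str_split₀_eq, str_split₀_eq, PySem.Str.toList_strip, split₀_strip]

lemma ws_iff (s : String) :
    (PySem.Str.split₀ s ≠ []) ↔ (PySem.Str.strip s ≠ "") := by
  rw [str_split₀_eq, PySem.Str.strip.eq_1]
  constructor
  · intro h hs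
    apply h
    have : PySem.Chars.strip s.toList = [] := by
      have := congrArg String.toList hs
      simpa using this
    rw [(split₀_eq_nil_iff _).mpr ((strip_eq_nil_iff _).mp this)]
    rfl
  · intro h hl
    apply h
    have h0 : PySem.Chars.split₀ s.toList = [] := by
      cases he : PySem.Chars.split₀ s.toList with
      | nil => rfl
      | cons a l => rw [he] at hl; simp at hl
    rw [(strip_eq_nil_iff _).mpr ((split₀_eq_nil_iff _).mp h0)]

lemma pySplitDot_eq (s : String) :
    pySplitDot s = (PySem.Chars.splitOn s.toList ['.']).map String.ofList := by
  unfold pySplitDot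
  rw [PySem.Str.split?.eq_1, dotToList, PySem.Chars.split?.eq_1]
  simp

------------------------------------------------------------------ B side

lemma cleanedOf_struct (s : String) :
    cleanedOf s =
      (if '.' ∈ s.toList
       then (if PySem.Str.strip (String.ofList (s.toList.takeWhile (fun c => c != '.'))) ≠ ""
             then [PySem.Str.strip (String.ofList (s.toList.takeWhile (fun c => c != '.')))] else [])
            ++ cleanedOf (String.ofList ((s.toList.dropWhile (fun c => c != '.')).tail))
       else (if PySem.Str.strip s ≠ "" then [PySem.Str.strip s] else [])) := by
  unfold cleanedOf
  rw [pySplitDot_eq, splitOn_dot]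
  by_cases hd : '.' ∈ s.toList
  · simp only [hd, if_true, List.map_cons, List.map_map, List.filter_cons]
    rw [pySplitDot_eq]
    simp only [String.toList_ofList]
    by_cases hx : PySem.Str.strip (String.ofList (s.toList.takeWhile (fun c => c != '.'))) ≠ ""
    · simp [hx]
    · simp only [ne_eq, not_not] at hx
      simp [hx]
  · simp only [hd, if_false, List.map_cons, List.map_nil, List.filter_cons]
    have : String.ofList s.toList = s := String.ofList_toList
    by_cases hx : PySem.Str.strip s ≠ ""
    · simp [this, hx]
    · simp only [ne_eq, not_not] at hx
      simp [this, hx]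

lemma bGo_eq (L : Nat) : ∀ (rest : String), rest.toList.length = L →
    ∀ (c : PySem.Dict Int String) (w : PySem.Dict Int (List String))
      (ch : PySem.Dict Int (List (List String))) (n : Int),
    (∀ k ∈ c.keys, k < n) → (∀ k ∈ w.keys, k < n) → (∀ k ∈ ch.keys, k < n) →
    splitParagraphBGo rest c w ch n =
      (c.items ++ (canonOf rest n).1, w.items ++ (canonOf rest n).2.1,
       ch.items ++ (canonOf rest n).2.2) := by
  induction L using Nat.strong_induction_on with
  | _ L IH =>
  intro rest hL c w ch n hc hw hch
  have hcget : c.contains n = false := by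
    rw [PySem.Dict.contains_eq_decide_mem_keys]
    simp only [decide_eq_false_iff_not]
    intro hm; exact absurd (hc n hm) (lt_irrefl n)
  have hwget : w.contains n = false := by
    rw [PySem.Dict.contains_eq_decide_mem_keys]
    simp only [decide_eq_false_iff_not]
    intro hm; exact absurd (hw n hm) (lt_irrefl n)
  have hchget : ch.contains n = false := by
    rw [PySem.Dict.contains_eq_decide_mem_keys]
    simp only [decide_eq_false_iff_not]
    intro hm; exact absurd (hch n hm) (lt_irrefl n)
  rw [splitParagraphBGo, parts_eq, splitOnMax_dot]
  by_cases hd : '.' ∈ rest.toList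
  · -- a '.' is present: one sentence is peeled off and the loop recurses on the tail
    rw [if_pos hd]
    simp only [List.map_cons, List.map_nil, List.getD_cons_zero, List.getD_cons_succ,
      List.length_cons, List.length_nil]
    rw [dif_neg (by omega)]
    have hlt : ((rest.toList.dropWhile (fun c => c != '.')).tail).length < L := by
      have hne : rest.toList.dropWhile (fun c => c != '.') ≠ [] := by
        intro hnil
        have h4 := List.dropWhile_eq_nil_iff.mp hnil
        have h5 := h4 '.' hd
        simp at h5
      have h1 : (rest.toList.dropWhile (fun c => c != '.')).length ≤ rest.toList.length :=
        List.length_dropWhile_le _ _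
      have h2 : 0 < (rest.toList.dropWhile (fun c => c != '.')).length :=
        List.length_pos_iff.mpr hne
      simp only [List.length_tail]
      omega
    by_cases hws : PySem.Str.split₀ (String.ofList (rest.toList.takeWhile (fun c => c != '.'))) ≠ []
    · rw [if_pos hws]
      have hstrip : PySem.Str.strip (String.ofList (rest.toList.takeWhile (fun c => c != '.'))) ≠ "" :=
        (ws_iff _).mp hws
      rw [IH _ (by omega) _ (by simp) _ _ _ (n + 1)
            (by intro k hk
                rcases (PySem.Dict.mem_keys_insert _ _ _ _).mp hk with hk | hk
                · omega
                · have := hc k hk; omega)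
            (by intro k hk
                rcases (PySem.Dict.mem_keys_insert _ _ _ _).mp hk with hk | hk
                · omega
                · have := hw k hk; omega)
            (by intro k hk
                rcases (PySem.Dict.mem_keys_insert _ _ _ _).mp hk with hk | hk
                · omega
                · have := hch k hk; omega)]
      rw [PySem.Dict.items_insert_of_not_contains _ _ hcget,
          PySem.Dict.items_insert_of_not_contains _ _ hwget,
          PySem.Dict.items_insert_of_not_contains _ _ hchget]
      simp only [canonOf]
      rw [cleanedOf_struct rest, if_pos hd, if_pos hstrip]
      simp [PySem.List.enumerate_cons, str_split₀_strip]
    · rw [if_neg hws]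
      simp only [ne_eq, not_not] at hws
      have hstrip : PySem.Str.strip (String.ofList (rest.toList.takeWhile (fun c => c != '.'))) = "" := by
        by_contra hne
        exact ((ws_iff _).mpr hne) hws
      rw [IH _ (by omega) _ (by simp) _ _ _ n hc hw hch]
      simp only [canonOf]
      rw [cleanedOf_struct rest, if_pos hd, if_neg (by simp [hstrip])]
      simp
  · -- no '.' left: the final fragment is processed and the loop stops
    rw [if_neg hd]
    simp only [List.map_cons, List.map_nil, List.getD_cons_zero, String.ofList_toList,
      List.length_cons, List.length_nil]
    simp only [dite_true]
    by_cases hws : PySem.Str.split₀ rest ≠ []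
    · rw [if_pos hws]
      have hstrip : PySem.Str.strip rest ≠ "" := (ws_iff rest).mp hws
      rw [PySem.Dict.items_insert_of_not_contains _ _ hcget,
          PySem.Dict.items_insert_of_not_contains _ _ hwget,
          PySem.Dict.items_insert_of_not_contains _ _ hchget]
      simp only [canonOf]
      rw [cleanedOf_struct rest, if_neg hd, if_pos hstrip]
      simp [PySem.List.enumerate_cons, str_split₀_strip]
    · rw [if_neg hws]
      simp only [ne_eq, not_not] at hws
      have hstrip : PySem.Str.strip rest = "" := by
        by_contra hne
        exact ((ws_iff rest).mpr hne) hws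
      simp only [canonOf]
      rw [cleanedOf_struct rest, if_neg hd, if_neg (by simp [hstrip])]
      simp

lemma B_eq_canon (p : String) : splitParagraph_alt p = canonOf p 1 := by
  unfold splitParagraph_alt
  rw [bGo_eq p.toList.length p rfl _ _ _ 1 (by simp) (by simp) (by simp)]
  rfl

-- ===== VERDICT (by name: the statement is the Claim_ definition above) =====
theorem splitParagraph_spec : Claim_equal_splitParagraph := by
  intro paragraph _
  unfold Spec_splitParagraph
  rw [A_eq_canon, B_eq_canon]
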